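-- pv_equiv track=rewrite | github.com/signavio/bpmn2constraints | bpmnsignal/compiler_comparison_script.py | filter_constraints
-- ===== SOURCE A (Python) =====
-- def filter_constraints(num_elem_types, petri_net_cons):
--     """
--     Filters constraints.
--     """
--     if 'Exclusive_Databased_Gateway' not in num_elem_types and any(
--             con.startswith("Exclusive Choice") for con in petri_net_cons):
--         petri_net_cons = [
--             con for con in petri_net_cons
--             if not con.startswith('Exclusive Choice')
--         ]
--
--     if 'ParallelGateway' not in num_elem_types and any(
--             con.startswith("Co-Existence") for con in petri_net_cons):
--         petri_net_cons = [
--             con for con in petri_net_cons if not con.startswith('Co-Existence')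
--         ]
--         petri_net_cons = [
--             con for con in petri_net_cons if not con.startswith('Alternate')
--         ]
--
--     if ('ParallelGateway' not in num_elem_types
--             or 'Exclusive_Databased_Gateway' not in num_elem_types):
--         petri_net_cons = [
--             con for con in petri_net_cons if not con.startswith('Response')
--         ]
--         petri_net_cons = [
--             con for con in petri_net_cons if not con.startswith('Precedence')
--         ]
--
--     return petri_net_cons
-- ===== SOURCE B (Python) =====
-- def filter_constraints(num_elem_types, petri_net_cons):
--     """
--     Filters constraints: build the set of forbidden prefixes from the
--     gateway types once, then drop matching constraints in a single pass.
--     """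
--     forbidden = []
--     if 'Exclusive_Databased_Gateway' not in num_elem_types:
--         forbidden.append('Exclusive Choice')
--     if 'ParallelGateway' not in num_elem_types:
--         forbidden += ['Co-Existence', 'Alternate']
--     if ('ParallelGateway' not in num_elem_types
--             or 'Exclusive_Databased_Gateway' not in num_elem_types):
--         forbidden += ['Response', 'Precedence']
--     prefixes = tuple(forbidden)
--     return [con for con in petri_net_cons if not con.startswith(prefixes)]
-- ===== Notes on version B (the rewrite author's own statement) =====
-- stated objective: simpler
-- what changed: B builds the forbidden-prefix table from the gateway types once and filters in a single pass, instead of A's four guarded sequential filtering passes; B also drops the accidental any('Co-Existence') guard that gates the removal of 'Alternate' constraints.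
-- intended difference: When 'ParallelGateway' is absent, no constraint starts with 'Co-Existence' but some starts with 'Alternate', A keeps the 'Alternate' constraints (its removal is accidentally gated by the presence of a 'Co-Existence' constraint) while B removes them, which is the intended pruning for a model without parallel gateways. — e.g. on filter_constraints([], ["Alternate 1", "ok"]): A returns ["Alternate 1", "ok"], B returns ["ok"]
import Mathlib
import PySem

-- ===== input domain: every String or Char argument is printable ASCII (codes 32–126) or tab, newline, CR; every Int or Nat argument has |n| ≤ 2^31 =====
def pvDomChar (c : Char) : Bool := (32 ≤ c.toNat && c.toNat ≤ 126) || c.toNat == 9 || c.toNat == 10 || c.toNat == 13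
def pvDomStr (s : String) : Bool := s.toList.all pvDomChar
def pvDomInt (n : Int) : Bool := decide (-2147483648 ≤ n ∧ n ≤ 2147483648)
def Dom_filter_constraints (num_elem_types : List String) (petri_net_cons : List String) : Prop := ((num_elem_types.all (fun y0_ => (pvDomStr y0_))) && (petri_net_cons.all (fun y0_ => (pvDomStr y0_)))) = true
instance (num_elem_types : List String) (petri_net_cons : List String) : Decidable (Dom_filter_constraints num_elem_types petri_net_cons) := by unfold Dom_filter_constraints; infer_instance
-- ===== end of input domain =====

-- B replaces A's four guarded sequential filtering passes by one forbidden-prefix table plus a single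
-- filtering pass (objective: simpler); A and B differ only on the D_ inputs stated below, where B's
-- value is the intended one.


-- ===== PORT A =====
def filter_constraints (num_elem_types : List String) (petri_net_cons : List String) : List String :=
  let c1 :=
    if (!num_elem_types.contains "Exclusive_Databased_Gateway") &&
        petri_net_cons.any (fun con => PySem.Str.startswith con "Exclusive Choice") then
      petri_net_cons.filter (fun con => !PySem.Str.startswith con "Exclusive Choice")
    else petri_net_cons
  let c2 :=
    if (!num_elem_types.contains "ParallelGateway") &&
        c1.any (fun con => PySem.Str.startswith con "Co-Existence") then
      (c1.filter (fun con => !PySem.Str.startswith con "Co-Existence")).filter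
        (fun con => !PySem.Str.startswith con "Alternate")
    else c1
  if (!num_elem_types.contains "ParallelGateway") ||
      (!num_elem_types.contains "Exclusive_Databased_Gateway") then
    (c2.filter (fun con => !PySem.Str.startswith con "Response")).filter
      (fun con => !PySem.Str.startswith con "Precedence")
  else c2

-- ===== PORT B =====
def filter_constraints_alt (num_elem_types : List String) (petri_net_cons : List String) : List String :=
  let forbidden : List String :=
    (if !num_elem_types.contains "Exclusive_Databased_Gateway" then ["Exclusive Choice"] else []) ++
    (if !num_elem_types.contains "ParallelGateway" then ["Co-Existence", "Alternate"] else []) ++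
    (if (!num_elem_types.contains "ParallelGateway") ||
        (!num_elem_types.contains "Exclusive_Databased_Gateway") then ["Response", "Precedence"] else [])
  petri_net_cons.filter (fun con => !forbidden.any (fun p => PySem.Str.startswith con p))

-- ===== PRECONDITION & SPEC =====
-- When 'ParallelGateway' is absent, no constraint starts with 'Co-Existence' but some starts with
-- 'Alternate', A keeps the 'Alternate' constraints (their removal is accidentally gated by the
-- presence of a 'Co-Existence' constraint) while B removes them, which is the intended pruning for a
-- model without parallel gateways.
def D_filter_constraints (num_elem_types : List String) (petri_net_cons : List String) : Prop :=
  "ParallelGateway" ∉ num_elem_types ∧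
  (∀ con ∈ petri_net_cons, PySem.Str.startswith con "Co-Existence" = false) ∧
  (∃ con ∈ petri_net_cons, PySem.Str.startswith con "Alternate" = true)
instance (num_elem_types : List String) (petri_net_cons : List String) : Decidable (D_filter_constraints num_elem_types petri_net_cons) := by unfold D_filter_constraints; infer_instance

def Spec_filter_constraints (num_elem_types : List String) (petri_net_cons : List String) (out : List String) : Prop := ¬ D_filter_constraints num_elem_types petri_net_cons → out = filter_constraints_alt num_elem_types petri_net_cons
instance (num_elem_types : List String) (petri_net_cons : List String) (out : List String) : Decidable (Spec_filter_constraints num_elem_types petri_net_cons out) := by unfold Spec_filter_constraints; infer_instance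

def pvDiffWitness_filter_constraints : List String × List String := ([], ["Alternate 1", "ok"])
def pvDiffWitnessOut_filter_constraints : (List String) × (List String) := (["Alternate 1", "ok"], ["ok"])

-- ===== CLAIM (what is proved, stated in full; the proofs are below) =====
def Claim_unchanged_filter_constraints : Prop := ∀ (num_elem_types : List String) (petri_net_cons : List String), Dom_filter_constraints num_elem_types petri_net_cons → Spec_filter_constraints num_elem_types petri_net_cons (filter_constraints num_elem_types petri_net_cons)
def Claim_changed_filter_constraints : Prop := Dom_filter_constraints (pvDiffWitness_filter_constraints.1) (pvDiffWitness_filter_constraints.2) ∧ D_filter_constraints (pvDiffWitness_filter_constraints.1) (pvDiffWitness_filter_constraints.2) ∧ filter_constraints (pvDiffWitness_filter_constraints.1) (pvDiffWitness_filter_constraints.2) = pvDiffWitnessOut_filter_constraints.1 ∧ filter_constraints_alt (pvDiffWitness_filter_constraints.1) (pvDiffWitness_filter_constraints.2) = pvDiffWitnessOut_filter_constraints.2 ∧ pvDiffWitnessOut_filter_constraints.1 ≠ pvDiffWitnessOut_filter_constraints.2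
def Claim_exact_filter_constraints : Prop := ∀ (num_elem_types : List String) (petri_net_cons : List String), Dom_filter_constraints num_elem_types petri_net_cons → D_filter_constraints num_elem_types petri_net_cons → filter_constraints num_elem_types petri_net_cons ≠ filter_constraints_alt num_elem_types petri_net_cons

-- ===== LEMMAS AND PROOFS =====

-- if s starts with a nonempty prefix p, s's first character is p's first character
theorem pv_sw_head {s p : String} (h : PySem.Str.startswith s p = true) (hp : p.toList ≠ []) :
    s.toList.head? = p.toList.head? := by
  have h' : p.toList <+: s.toList := by
    simpa [PySem.Chars.startswith_iff] using h
  obtain ⟨t, ht⟩ := h'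
  cases hpl : p.toList with
  | nil => exact absurd hpl hp
  | cons a l => rw [← ht, hpl]; rfl

-- two nonempty prefixes with different first characters cannot both be prefixes of s
theorem pv_sw_disj {s p q : String} (h : PySem.Str.startswith s p = true)
    (hp : p.toList ≠ []) (hq : q.toList ≠ []) (hne : p.toList.head? ≠ q.toList.head?) :
    PySem.Str.startswith s q = false := by
  cases hsw : PySem.Str.startswith s q with
  | false => rfl
  | true =>
    have h1 := pv_sw_head h hp
    have h2 := pv_sw_head hsw hq
    exact absurd (h1.symm.trans h2) hne

theorem pv_CE_EC {s : String} (h : PySem.Str.startswith s "Co-Existence" = true) :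
    PySem.Str.startswith s "Exclusive Choice" = false :=
  pv_sw_disj h (by decide) (by decide) (by decide)

theorem pv_AL_EC {s : String} (h : PySem.Str.startswith s "Alternate" = true) :
    PySem.Str.startswith s "Exclusive Choice" = false :=
  pv_sw_disj h (by decide) (by decide) (by decide)

theorem pv_AL_RE {s : String} (h : PySem.Str.startswith s "Alternate" = true) :
    PySem.Str.startswith s "Response" = false :=
  pv_sw_disj h (by decide) (by decide) (by decide)

theorem pv_AL_PR {s : String} (h : PySem.Str.startswith s "Alternate" = true) :
    PySem.Str.startswith s "Precedence" = false :=
  pv_sw_disj h (by decide) (by decide) (by decide)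

-- a false `any` gives element-wise falsity, and conversely
theorem pv_all_false {p : String → Bool} {c : List String} (h : c.any p = false) :
    ∀ x ∈ c, p x = false := by
  intro x hx
  cases hpx : p x with
  | false => rfl
  | true =>
    have hh : c.any p = true := List.any_eq_true.mpr ⟨x, hx, hpx⟩
    rw [hh] at h
    exact h

theorem pv_any_false {p : String → Bool} {c : List String} (h : ∀ x ∈ c, p x = false) :
    c.any p = false := by
  cases hh : c.any p with
  | false => rfl
  | true =>
    obtain ⟨x, hx, hpx⟩ := List.any_eq_true.mp hh
    rw [h x hx] at hpx
    exact hpx.symm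

-- filtering out "Exclusive Choice" constraints does not change whether a "Co-Existence" one exists
theorem pv_anyCE_filterEC (c : List String) :
    ((c.filter (fun con => !PySem.Str.startswith con "Exclusive Choice")).any
        (fun con => PySem.Str.startswith con "Co-Existence")) =
      c.any (fun con => PySem.Str.startswith con "Co-Existence") := by
  cases h : c.any (fun con => PySem.Str.startswith con "Co-Existence") with
  | true =>
    obtain ⟨x, hx, hce⟩ := List.any_eq_true.mp h
    exact List.any_eq_true.mpr
      ⟨x, List.mem_filter.mpr ⟨hx, by rw [pv_CE_EC hce, Bool.not_false]⟩, hce⟩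
  | false =>
    refine pv_any_false ?_
    intro x hx
    exact pv_all_false h x (List.mem_filter.mp hx).1

theorem pv_unchanged : ∀ (t c : List String), ¬ D_filter_constraints t c →
    filter_constraints t c = filter_constraints_alt t c := by
  intro t c hD
  unfold filter_constraints filter_constraints_alt
  unfold D_filter_constraints at hD
  cases hP : t.contains "ParallelGateway" with
  | true =>
    cases hX : t.contains "Exclusive_Databased_Gateway" with
    | true =>
      simp only [hP, hX, Bool.not_true, Bool.false_and, Bool.false_or, Bool.false_eq_true, eq_self_iff_true, if_true, if_false,
        List.nil_append, List.append_nil, List.any_nil, Bool.not_false,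
        List.filter_true]
    | false =>
      cases hEC : c.any (fun con => PySem.Str.startswith con "Exclusive Choice") with
      | true =>
        simp only [hP, hX, hEC, Bool.not_true, Bool.not_false, Bool.false_and,
          Bool.true_and, Bool.and_true, Bool.false_or, Bool.or_false, Bool.false_eq_true, eq_self_iff_true, if_true, if_false,
          List.filter_filter, List.nil_append, List.append_nil, List.cons_append]
        refine List.filter_congr ?_
        intro x _
        simp only [List.any_cons, List.any_nil]
        cases h1 : PySem.Str.startswith x "Exclusive Choice" <;>
          cases h2 : PySem.Str.startswith x "Response" <;>
          cases h3 : PySem.Str.startswith x "Precedence" <;> decide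
      | false =>
        have hecf := pv_all_false hEC
        simp only [hP, hX, hEC, Bool.not_true, Bool.not_false, Bool.false_and,
          Bool.true_and, Bool.and_true, Bool.and_false, Bool.false_or, Bool.or_false,
          Bool.false_eq_true, eq_self_iff_true, if_true, if_false, List.filter_filter, List.nil_append, List.append_nil,
          List.cons_append]
        refine List.filter_congr ?_
        intro x hx
        simp only [List.any_cons, List.any_nil, hecf x hx]
        cases h2 : PySem.Str.startswith x "Response" <;>
          cases h3 : PySem.Str.startswith x "Precedence" <;> decide
  | false =>
    have hPmem : "ParallelGateway" ∉ t := by simpa using hP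
    cases hX : t.contains "Exclusive_Databased_Gateway" with
    | true =>
      cases hCE : c.any (fun con => PySem.Str.startswith con "Co-Existence") with
      | true =>
        simp only [hP, hX, hCE, Bool.not_true, Bool.not_false, Bool.false_and,
          Bool.true_and, Bool.and_true, Bool.true_or, Bool.or_false, Bool.false_or,
          Bool.false_eq_true, eq_self_iff_true, if_true, if_false, List.filter_filter, List.nil_append, List.append_nil,
          List.cons_append]
        refine List.filter_congr ?_
        intro x _
        simp only [List.any_cons, List.any_nil]
        cases h1 : PySem.Str.startswith x "Co-Existence" <;>
          cases h2 : PySem.Str.startswith x "Alternate" <;>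
          cases h3 : PySem.Str.startswith x "Response" <;>
          cases h4 : PySem.Str.startswith x "Precedence" <;> decide
      | false =>
        have hcef := pv_all_false hCE
        have half : ∀ x ∈ c, PySem.Str.startswith x "Alternate" = false := by
          intro x hx
          cases hal : PySem.Str.startswith x "Alternate" with
          | false => rfl
          | true => exact absurd ⟨hPmem, hcef, ⟨x, hx, hal⟩⟩ hD
        simp only [hP, hX, hCE, Bool.not_true, Bool.not_false, Bool.false_and,
          Bool.true_and, Bool.and_true, Bool.and_false, Bool.true_or, Bool.or_false,
          Bool.false_or, Bool.false_eq_true, eq_self_iff_true, if_true, if_false, List.filter_filter, List.nil_append,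
          List.append_nil, List.cons_append]
        refine List.filter_congr ?_
        intro x hx
        simp only [List.any_cons, List.any_nil, hcef x hx, half x hx]
        cases h3 : PySem.Str.startswith x "Response" <;>
          cases h4 : PySem.Str.startswith x "Precedence" <;> decide
    | false =>
      cases hEC : c.any (fun con => PySem.Str.startswith con "Exclusive Choice") with
      | true =>
        cases hCE : c.any (fun con => PySem.Str.startswith con "Co-Existence") with
        | true =>
          simp only [hP, hX, hEC, Bool.not_true, Bool.not_false, Bool.true_and,
            Bool.and_true, Bool.true_or, Bool.false_eq_true, eq_self_iff_true, if_true, if_false, pv_anyCE_filterEC, hCE,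
            List.filter_filter, List.nil_append, List.append_nil, List.cons_append]
          refine List.filter_congr ?_
          intro x _
          simp only [List.any_cons, List.any_nil]
          cases h0 : PySem.Str.startswith x "Exclusive Choice" <;>
            cases h1 : PySem.Str.startswith x "Co-Existence" <;>
            cases h2 : PySem.Str.startswith x "Alternate" <;>
            cases h3 : PySem.Str.startswith x "Response" <;>
            cases h4 : PySem.Str.startswith x "Precedence" <;> decide
        | false =>
          have hcef := pv_all_false hCE
          have half : ∀ x ∈ c, PySem.Str.startswith x "Alternate" = false := by
            intro x hx
            cases hal : PySem.Str.startswith x "Alternate" with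
            | false => rfl
            | true => exact absurd ⟨hPmem, hcef, ⟨x, hx, hal⟩⟩ hD
          simp only [hP, hX, hEC, Bool.not_true, Bool.not_false, Bool.true_and,
            Bool.and_true, Bool.and_false, Bool.true_or, Bool.false_eq_true, eq_self_iff_true, if_true, if_false,
            pv_anyCE_filterEC, hCE, List.filter_filter, List.nil_append,
            List.append_nil, List.cons_append]
          refine List.filter_congr ?_
          intro x hx
          simp only [List.any_cons, List.any_nil, hcef x hx, half x hx]
          cases h0 : PySem.Str.startswith x "Exclusive Choice" <;>
            cases h3 : PySem.Str.startswith x "Response" <;>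
            cases h4 : PySem.Str.startswith x "Precedence" <;> decide
      | false =>
        have hecf := pv_all_false hEC
        cases hCE : c.any (fun con => PySem.Str.startswith con "Co-Existence") with
        | true =>
          simp only [hP, hX, hEC, hCE, Bool.not_true, Bool.not_false, Bool.true_and,
            Bool.and_true, Bool.and_false, Bool.false_and, Bool.true_or, Bool.false_eq_true, eq_self_iff_true, if_true, if_false,
            List.filter_filter, List.nil_append, List.append_nil, List.cons_append]
          refine List.filter_congr ?_
          intro x hx
          simp only [List.any_cons, List.any_nil, hecf x hx]
          cases h1 : PySem.Str.startswith x "Co-Existence" <;>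
            cases h2 : PySem.Str.startswith x "Alternate" <;>
            cases h3 : PySem.Str.startswith x "Response" <;>
            cases h4 : PySem.Str.startswith x "Precedence" <;> decide
        | false =>
          have hcef := pv_all_false hCE
          have half : ∀ x ∈ c, PySem.Str.startswith x "Alternate" = false := by
            intro x hx
            cases hal : PySem.Str.startswith x "Alternate" with
            | false => rfl
            | true => exact absurd ⟨hPmem, hcef, ⟨x, hx, hal⟩⟩ hD
          simp only [hP, hX, hEC, hCE, Bool.not_true, Bool.not_false, Bool.true_and,
            Bool.and_true, Bool.and_false, Bool.false_and, Bool.true_or, Bool.false_eq_true, eq_self_iff_true, if_true, if_false,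
            List.filter_filter, List.nil_append, List.append_nil, List.cons_append]
          refine List.filter_congr ?_
          intro x hx
          simp only [List.any_cons, List.any_nil, hecf x hx, hcef x hx, half x hx]
          cases h3 : PySem.Str.startswith x "Response" <;>
            cases h4 : PySem.Str.startswith x "Precedence" <;> decide

-- ===== VERDICT (by name: the statement is the Claim_ definition above) =====
theorem filter_constraints_spec : Claim_unchanged_filter_constraints := by
  intro t c _ hD
  exact pv_unchanged t c hD

theorem filter_constraints_changed : Claim_changed_filter_constraints := by
  unfold Claim_changed_filter_constraints; decide

theorem filter_constraints_tight : Claim_exact_filter_constraints := by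
  intro t c _ hD heq
  obtain ⟨hPmem, hcef, x, hx, hal⟩ := hD
  have hP : t.contains "ParallelGateway" = false := by simpa using hPmem
  -- x survives all of A's passes
  have hxA : x ∈ filter_constraints t c := by
    unfold filter_constraints
    have hc1 : x ∈ (if (!t.contains "Exclusive_Databased_Gateway") &&
        c.any (fun con => PySem.Str.startswith con "Exclusive Choice") then
          c.filter (fun con => !PySem.Str.startswith con "Exclusive Choice")
        else c) := by
      split
      · exact List.mem_filter.mpr ⟨hx, by rw [pv_AL_EC hal, Bool.not_false]⟩
      · exact hx
    have hany : ((if (!t.contains "Exclusive_Databased_Gateway") &&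
        c.any (fun con => PySem.Str.startswith con "Exclusive Choice") then
          c.filter (fun con => !PySem.Str.startswith con "Exclusive Choice")
        else c).any (fun con => PySem.Str.startswith con "Co-Existence")) = false := by
      refine pv_any_false ?_
      intro y hy
      refine hcef y ?_
      revert hy; split
      · intro hy; exact (List.mem_filter.mp hy).1
      · intro hy; exact hy
    simp only [hP, Bool.not_false, Bool.true_and, Bool.true_or, hany,
      Bool.and_false, Bool.false_eq_true, eq_self_iff_true, if_true, if_false]
    exact List.mem_filter.mpr ⟨List.mem_filter.mpr ⟨hc1, by rw [pv_AL_RE hal, Bool.not_false]⟩,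
      by rw [pv_AL_PR hal, Bool.not_false]⟩
  -- x is removed by B's single pass
  have hxB : x ∉ filter_constraints_alt t c := by
    unfold filter_constraints_alt
    intro hmem
    have h2 := (List.mem_filter.mp hmem).2
    have h2' : (!(((if !t.contains "Exclusive_Databased_Gateway" then
          ["Exclusive Choice"] else []) ++
        (if !t.contains "ParallelGateway" then ["Co-Existence", "Alternate"] else []) ++
        (if (!t.contains "ParallelGateway") ||
            (!t.contains "Exclusive_Databased_Gateway") then
          ["Response", "Precedence"] else [])).any
            (fun p => PySem.Str.startswith x p))) = true := h2
    have h3 : (((if !t.contains "Exclusive_Databased_Gateway" then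
          ["Exclusive Choice"] else []) ++
        (if !t.contains "ParallelGateway" then ["Co-Existence", "Alternate"] else []) ++
        (if (!t.contains "ParallelGateway") ||
            (!t.contains "Exclusive_Databased_Gateway") then
          ["Response", "Precedence"] else [])).any
            (fun p => PySem.Str.startswith x p)) = false := by
      cases h : (((if !t.contains "Exclusive_Databased_Gateway" then
          ["Exclusive Choice"] else []) ++
        (if !t.contains "ParallelGateway" then ["Co-Existence", "Alternate"] else []) ++
        (if (!t.contains "ParallelGateway") ||
            (!t.contains "Exclusive_Databased_Gateway") then
          ["Response", "Precedence"] else [])).any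
            (fun p => PySem.Str.startswith x p)) with
      | false => rfl
      | true => rw [h] at h2'; exact absurd h2' (by decide)
    have hALmem : "Alternate" ∈ ((if !t.contains "Exclusive_Databased_Gateway" then
          ["Exclusive Choice"] else []) ++
        (if !t.contains "ParallelGateway" then ["Co-Existence", "Alternate"] else []) ++
        (if (!t.contains "ParallelGateway") ||
            (!t.contains "Exclusive_Databased_Gateway") then
          ["Response", "Precedence"] else [])) := by
      simpa [hP] using hPmem
    have h4 := pv_all_false h3 "Alternate" hALmem
    rw [hal] at h4
    exact absurd h4 (by decide)
  rw [heq] at hxA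
  exact hxB hxA
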